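-- pv_equiv track=rewrite | github.com/wiberganton/obpcreator | obpcreator/support_functions/slicer.py | combine_arrays
-- ===== SOURCE A (Python) =====
-- def combine_arrays(arrays):
--     #create a new array with matplotlibs which adds different sliced stl files into different shapes
--
--     numb_of_layers = 0 #Get the numb of layers based on the file with most layers
--     for array in arrays:
--         if len(array) > numb_of_layers:
--             numb_of_layers = len(array)
--
--     new_array = []
--     for i in range(numb_of_layers):
--         layer_array = []
--         for array in arrays:
--             if len(array)<=i:
--                 layer_array.append([])
--             else:
--                 layer_array.append(array[i][0])
--         new_array.append(layer_array)
--
--     return new_array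
-- ===== SOURCE B (Python) =====
-- def combine_arrays(arrays):
--     # Column-wise transpose via per-array iterators with a unique sentinel,
--     # instead of computing the max layer count and indexing each array by layer.
--     _PAD = object()
--     iterators = [iter(array) for array in arrays]
--     new_array = []
--     while True:
--         row = []
--         seen = False
--         for it in iterators:
--             layer = next(it, _PAD)
--             if layer is _PAD:
--                 row.append([])
--             else:
--                 row.append(layer[0])
--                 seen = True
--         if not seen:
--             return new_array
--         new_array.append(row)
-- ===== Notes on version B (the rewrite author's own statement) =====
-- stated objective: idiomatic
-- what changed: B drops the explicit max-layer count and per-layer index loop with length checks, instead transposing the arrays column-wise through per-array iterators padded with a unique sentinel, stopping when every iterator is exhausted.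
import Mathlib
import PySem

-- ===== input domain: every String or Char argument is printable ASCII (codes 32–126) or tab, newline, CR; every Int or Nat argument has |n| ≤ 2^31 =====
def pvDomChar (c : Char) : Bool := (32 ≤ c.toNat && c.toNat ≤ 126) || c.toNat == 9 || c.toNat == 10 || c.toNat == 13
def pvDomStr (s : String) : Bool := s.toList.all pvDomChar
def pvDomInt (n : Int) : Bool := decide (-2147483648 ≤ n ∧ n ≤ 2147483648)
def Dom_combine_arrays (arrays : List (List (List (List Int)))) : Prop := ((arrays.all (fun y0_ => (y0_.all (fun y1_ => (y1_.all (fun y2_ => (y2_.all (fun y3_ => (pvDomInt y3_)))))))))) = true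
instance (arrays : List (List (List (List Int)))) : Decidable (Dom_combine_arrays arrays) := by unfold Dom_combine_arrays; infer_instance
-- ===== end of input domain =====

-- B replaces A's max-layer count + index loop by a column-wise iterator transpose
-- with sentinel padding (idiomatic decomposition; same cost).


-- ===== PORT A =====
-- array[i][0] is taken only when i < array.length, and Pre_ guarantees every layer
-- is nonempty, so getD/headD are exact there (Python raises IndexError otherwise).
def combine_arrays (arrays : List (List (List (List Int)))) : List (List (List Int)) :=
  let numb_of_layers : Nat :=
    arrays.foldl (fun n array => if array.length > n then array.length else n) 0
  (List.range numb_of_layers).foldl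
    (fun new_array i =>
      new_array ++ [arrays.foldl
        (fun layer_array array =>
          layer_array ++ [if array.length ≤ i then ([] : List Int)
                          else (array.getD i []).headD []]) []])
    []

-- ===== PORT B =====
-- termination helpers for the while-loop port (cited by decreasing_by)
theorem pv_sum_tail_le {α : Type} (its : List (List α)) :
    ((its.map List.tail).map List.length).sum ≤ (its.map List.length).sum := by
  induction its with
  | nil => simp
  | cons a t ih =>
    simp only [List.map_cons, List.sum_cons]
    have : a.tail.length ≤ a.length := by
      cases a <;> simp
    omega

theorem pv_sum_tail_lt {α : Type} (its : List (List α))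
    (h : its.any (fun it => !it.isEmpty) = true) :
    ((its.map List.tail).map List.length).sum < (its.map List.length).sum := by
  induction its with
  | nil => simp at h
  | cons a t ih =>
    simp only [List.any_cons, Bool.or_eq_true] at h
    simp only [List.map_cons, List.sum_cons]
    rcases h with h | h
    · have h1 : a.tail.length < a.length := by
        cases a with
        | nil => simp at h
        | cons x xs => simp
      have := pv_sum_tail_le t
      omega
    · have h1 : a.tail.length ≤ a.length := by cases a <;> simp
      have := ih h
      omega

-- the while loop of B: one row per column, advancing every iterator (tail);
-- `next(it, _PAD)` returning the sentinel is the [] case of the match.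
def combine_arrays_alt_loop (its : List (List (List (List Int)))) : List (List (List Int)) :=
  if _h : its.any (fun it => !it.isEmpty) then
    (its.map (fun it => match it with
      | [] => ([] : List Int)
      | layer :: _ => layer.headD [])) :: combine_arrays_alt_loop (its.map List.tail)
  else []
termination_by (its.map List.length).sum
decreasing_by simpa using pv_sum_tail_lt its _h

def combine_arrays_alt (arrays : List (List (List (List Int)))) : List (List (List Int)) :=
  combine_arrays_alt_loop arrays

-- ===== PRECONDITION & SPEC =====
-- Pre_ excludes exactly the inputs where Python A raises IndexError: an empty
-- layer list makes array[i][0] fail (B's layer[0] fails identically).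
def Pre_combine_arrays (arrays : List (List (List (List Int)))) : Prop :=
  ∀ array ∈ arrays, ∀ layer ∈ array, layer ≠ []
instance (arrays : List (List (List (List Int)))) : Decidable (Pre_combine_arrays arrays) := by
  unfold Pre_combine_arrays; infer_instance

def pvWitness_combine_arrays : List (List (List (List Int))) :=
  [[[[1, 2], [3]], [[4]]], [[[5]]], []]

def Spec_combine_arrays (arrays : List (List (List (List Int)))) (out : List (List (List Int))) : Prop := out = combine_arrays_alt arrays
instance (arrays : List (List (List (List Int)))) (out : List (List (List Int))) : Decidable (Spec_combine_arrays arrays out) := by unfold Spec_combine_arrays; infer_instance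

-- ===== CLAIM (what is proved, stated in full; the proofs are below) =====
def Claim_equal_combine_arrays : Prop := ∀ (arrays : List (List (List (List Int)))), Dom_combine_arrays arrays → Pre_combine_arrays arrays → Spec_combine_arrays arrays (combine_arrays arrays)

-- ===== LEMMAS AND PROOFS =====

-- the value both programs put at column i for a given array
def pvPick (i : Nat) (a : List (List (List Int))) : List Int :=
  if a.length ≤ i then [] else (a.getD i []).headD []

def pvMaxLen (its : List (List (List (List Int)))) : Nat :=
  its.foldl (fun n a => max n a.length) 0

theorem pv_foldl_snoc {α β : Type} (g : α → β) :
    ∀ (l : List α) (acc : List β),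
      l.foldl (fun r a => r ++ [g a]) acc = acc ++ l.map g := by
  intro l
  induction l with
  | nil => simp
  | cons a t ih => intro acc; simp [ih]

theorem pv_numb_eq_maxLen (arrays : List (List (List (List Int)))) :
    arrays.foldl (fun n array => if array.length > n then array.length else n) 0
      = pvMaxLen arrays := by
  unfold pvMaxLen
  congr 1
  funext n a
  by_cases h : a.length > n <;> simp [h] <;> omega

theorem pv_A_eq (arrays : List (List (List (List Int)))) :
    combine_arrays arrays
      = (List.range (pvMaxLen arrays)).map (fun i => arrays.map (pvPick i)) := by
  unfold combine_arrays
  rw [pv_numb_eq_maxLen]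
  rw [pv_foldl_snoc (fun i => arrays.foldl
        (fun layer_array array =>
          layer_array ++ [if array.length ≤ i then ([] : List Int)
                          else (array.getD i []).headD []]) [])]
  simp only [List.nil_append]
  apply List.map_congr_left
  intro i _
  have := pv_foldl_snoc (fun array => if array.length ≤ i then ([] : List Int)
                          else (array.getD i []).headD []) arrays ([] : List (List Int))
  rw [this]
  simp only [List.nil_append]
  apply List.map_congr_left
  intro a _
  simp [pvPick]

theorem pv_maxLen_aux (t : List (List (List (List Int)))) :
    ∀ acc : Nat, t.foldl (fun n a => max n a.length) acc
      = max acc (t.foldl (fun n a => max n a.length) 0) := by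
  induction t with
  | nil => intro acc; simp
  | cons b t ih =>
    intro acc
    simp only [List.foldl_cons]
    rw [ih (max acc b.length), ih (max 0 b.length)]
    omega

theorem pv_maxLen_cons (a : List (List (List Int))) (t : List (List (List (List Int)))) :
    pvMaxLen (a :: t) = max a.length (pvMaxLen t) := by
  unfold pvMaxLen
  simp only [List.foldl_cons]
  rw [pv_maxLen_aux t (max 0 a.length)]
  omega

theorem pv_any_iff (its : List (List (List (List Int)))) :
    its.any (fun it => !it.isEmpty) = true ↔ 0 < pvMaxLen its := by
  induction its with
  | nil => simp [pvMaxLen]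
  | cons a t ih =>
    rw [pv_maxLen_cons]
    simp only [List.any_cons, Bool.or_eq_true, ih]
    cases a with
    | nil => simp
    | cons x xs => simp

theorem pv_maxLen_tails (its : List (List (List (List Int)))) :
    pvMaxLen (its.map List.tail) = pvMaxLen its - 1 := by
  unfold pvMaxLen
  rw [List.foldl_map]
  suffices h : ∀ (l : List (List (List (List Int)))) (acc : Nat),
      l.foldl (fun n a => max n a.tail.length) (acc - 1)
        = l.foldl (fun n a => max n a.length) acc - 1 by
    have := h its 0
    simpa using this
  intro l
  induction l with
  | nil => intro acc; simp
  | cons a t ih =>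
    intro acc
    simp only [List.foldl_cons]
    have h1 : a.tail.length = a.length - 1 := by cases a <;> simp
    have h2 : max (acc - 1) (a.length - 1) = max acc a.length - 1 := by omega
    rw [h1, h2, ih]

theorem pv_pick_tail (i : Nat) (a : List (List (List Int))) :
    pvPick i a.tail = pvPick (i + 1) a := by
  unfold pvPick
  cases a with
  | nil => simp
  | cons x xs =>
    simp only [List.tail_cons, List.length_cons, List.getD_cons_succ]
    by_cases h : xs.length ≤ i
    · simp [h, Nat.succ_le_succ h]
    · have : ¬ (xs.length + 1 ≤ i + 1) := by omega
      simp [h, this]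

theorem pv_pick_zero (a : List (List (List Int))) :
    pvPick 0 a = (match a with
      | [] => ([] : List Int)
      | layer :: _ => layer.headD []) := by
  cases a <;> simp [pvPick]

theorem pv_alt_eq : ∀ (n : Nat) (its : List (List (List (List Int)))),
    pvMaxLen its = n →
    combine_arrays_alt_loop its = (List.range n).map (fun i => its.map (pvPick i)) := by
  intro n
  induction n with
  | zero =>
    intro its h
    rw [combine_arrays_alt_loop.eq_def]
    have : ¬ (its.any (fun it => !it.isEmpty) = true) := by
      rw [pv_any_iff, h]; omega
    simp [this]
  | succ n ih =>
    intro its h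
    rw [combine_arrays_alt_loop.eq_def]
    have hany : its.any (fun it => !it.isEmpty) = true := by
      rw [pv_any_iff, h]; omega
    rw [dif_pos hany]
    have htails : pvMaxLen (its.map List.tail) = n := by
      rw [pv_maxLen_tails, h]
      omega
    rw [ih _ htails]
    rw [List.range_succ_eq_map]
    simp only [List.map_cons, List.map_map]
    congr 1
    · apply List.map_congr_left
      intro a _
      exact (pv_pick_zero a).symm
    · apply List.map_congr_left
      intro i _
      simp only [Function.comp]
      apply List.map_congr_left
      intro a _
      simpa using pv_pick_tail i a

-- ===== VERDICT (by name: the statement is the Claim_ definition above) =====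
theorem combine_arrays_spec : Claim_equal_combine_arrays := by
  intro arrays _ _
  unfold Spec_combine_arrays combine_arrays_alt
  rw [pv_A_eq, pv_alt_eq (pvMaxLen arrays) arrays rfl]
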